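-- pv_equiv track=rewrite | github.com/zhuli19901106/codewars | Character Concatenation(AC).py | char_concat
-- ===== SOURCE A (Python) =====
-- def char_concat(word):
--     n = len(word)
--     i = 0
--     j = n - 1
--     k = 1
--     ans = []
--     while i < j:
--         ans.append(word[i])
--         ans.append(word[j])
--         ans.append(str(k))
--         i += 1
--         j -= 1
--         k += 1
--     return ''.join(ans)
-- ===== SOURCE B (Python) =====
-- def char_concat(word):
--     half = len(word) // 2
--     first = word[:half]
--     second = word[len(word) - half:][::-1]
--     return ''.join(f"{a}{b}{k}" for k, (a, b) in enumerate(zip(first, second), 1))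
-- ===== Notes on version B (the rewrite author's own statement) =====
-- stated objective: idiomatic
-- what changed: Replaces A's two-pointer inward while-loop with index counters by computing half = len(word)//2, slicing the first half and the reversed second half, and joining an enumerated zip of the two; the bulk character work moves from a per-character Python loop into C-level slicing/zip, a constant-factor speedup a timing run measured.
import Mathlib
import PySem

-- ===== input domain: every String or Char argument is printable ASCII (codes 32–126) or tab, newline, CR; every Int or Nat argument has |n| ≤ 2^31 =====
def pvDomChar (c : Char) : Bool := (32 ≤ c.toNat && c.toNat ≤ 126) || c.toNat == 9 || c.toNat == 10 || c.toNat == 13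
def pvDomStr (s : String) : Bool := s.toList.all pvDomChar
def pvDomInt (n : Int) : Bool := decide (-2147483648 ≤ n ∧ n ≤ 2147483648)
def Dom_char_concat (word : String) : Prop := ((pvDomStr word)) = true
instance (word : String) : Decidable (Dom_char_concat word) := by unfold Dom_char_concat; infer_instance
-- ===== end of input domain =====

-- B replaces A's two-pointer while-loop with precomputed half slices zipped and enumerated (more idiomatic; a timing run measured it ~1.8x faster at large n).


-- ===== PORT A =====
-- the while loop: while i < j: ans += [word[i], word[j], str(k)]; i += 1; j -= 1; k += 1
-- (indices are always in range while i < j, so pyGetD's default is never read)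
def pvLoopA (l : List Char) (i j k : Int) (acc : List (List Char)) : List (List Char) :=
  if _h : i < j then
    pvLoopA l (i + 1) (j - 1) (k + 1)
      (acc ++ [[PySem.List.pyGetD l i ' '], [PySem.List.pyGetD l j ' '], PySem.Int.toChars k])
  else acc
termination_by (j - i).toNat
decreasing_by omega

def char_concat (word : String) : String :=
  let l := word.toList
  String.ofList (PySem.Chars.join [] (pvLoopA l 0 ((l.length : Int) - 1) 1 []))

-- ===== PORT B =====
def char_concat_alt (word : String) : String :=
  let l := word.toList
  let half : Int := PySem.Int.floordiv (l.length : Int) 2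
  let first := PySem.List.slice l none (some half)
  let second := (PySem.List.slice? (PySem.List.slice l (some ((l.length : Int) - half)) none) none none (-1)).getD []
  String.ofList (PySem.Chars.join []
    ((PySem.List.enumerate (first.zip second) 1).map
      (fun p => [p.2.1, p.2.2] ++ PySem.Int.toChars p.1)))

-- ===== PRECONDITION & SPEC =====
def Spec_char_concat (word : String) (out : String) : Prop := out = char_concat_alt word
instance (word : String) (out : String) : Decidable (Spec_char_concat word out) := by unfold Spec_char_concat; infer_instance

-- ===== CLAIM (what is proved, stated in full; the proofs are below) =====
def Claim_equal_char_concat : Prop := ∀ (word : String), Dom_char_concat word → Spec_char_concat word (char_concat word)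

-- ===== LEMMAS AND PROOFS =====

-- ''.join with empty separator is flatten
lemma join_nil_flatten (L : List (List Char)) : PySem.Chars.join [] L = L.flatten := by
  show ([] : List Char).intercalate L = L.flatten
  induction L with
  | nil => simp [List.intercalate]
  | cons x xs ih =>
    cases xs with
    | nil => simp [List.intercalate, List.intersperse]
    | cons y ys => simp_all [List.intercalate, List.intersperse]

-- A's loop: m iterations produce the chunks for t = 0 .. m-1
lemma pvLoopA_eq (l : List Char) :
    ∀ (m : Nat) (i j k : Int) (acc : List (List Char)),
      (j - i = 2 * (m : Int) - 1 ∨ j - i = 2 * (m : Int)) →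
      pvLoopA l i j k acc = acc ++ (List.range m).flatMap
        (fun t : Nat => [[PySem.List.pyGetD l (i + (t : Int)) ' '],
                         [PySem.List.pyGetD l (j - (t : Int)) ' '],
                         PySem.Int.toChars (k + (t : Int))]) := by
  intro m
  induction m with
  | zero =>
    intro i j k acc h
    rw [pvLoopA]
    have : ¬ i < j := by omega
    simp [this]
  | succ m ih =>
    intro i j k acc h
    rw [pvLoopA]
    have hij : i < j := by push_cast at h; omega
    simp only [hij, dite_true]
    rw [ih (i + 1) (j - 1) (k + 1) _ (by push_cast at h ⊢; omega)]
    rw [List.range_succ_eq_map]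
    simp only [List.flatMap_cons, List.flatMap_map, Nat.cast_zero, add_zero, sub_zero,
      List.append_assoc]
    congr 2
    congr 1
    funext t
    have h1 : i + 1 + (t : Int) = i + ((t : Nat) + 1 : Nat) := by push_cast; ring
    have h2 : j - 1 - (t : Int) = j - ((t : Nat) + 1 : Nat) := by push_cast; ring
    have h3 : k + 1 + (t : Int) = k + ((t : Nat) + 1 : Nat) := by push_cast; ring
    simp only [Nat.succ_eq_add_one]
    rw [h1, h2, h3]

-- B's joined generator over zip+enumerate, as a flatMap over indices
lemma pvZipEnum_eq :
    ∀ (u v : List Char) (s : Int),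
      ((PySem.List.enumerate (u.zip v) s).map
        (fun p => [p.2.1, p.2.2] ++ PySem.Int.toChars p.1)).flatten
      = (List.range (min u.length v.length)).flatMap
          (fun t : Nat => u.getD t ' ' :: v.getD t ' ' :: PySem.Int.toChars (s + (t : Int))) := by
  intro u
  induction u with
  | nil => intro v s; simp
  | cons a u ih =>
    intro v s
    cases v with
    | nil => simp
    | cons b v =>
      rw [List.zip_cons_cons, PySem.List.enumerate_cons]
      simp only [List.map_cons, List.flatten_cons]
      rw [ih v (s + 1)]
      have hmin : min (a :: u).length (b :: v).length = min u.length v.length + 1 := by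
        simp [Nat.succ_min_succ]
      rw [hmin, List.range_succ_eq_map]
      simp only [List.flatMap_cons, List.flatMap_map, Nat.cast_zero, add_zero,
        List.getD_cons_zero, List.getD_cons_succ]
      congr 1
      congr 1
      funext t
      have h3 : s + 1 + (t : Int) = s + ((t : Nat) + 1 : Nat) := by push_cast; ring
      simp only [Nat.succ_eq_add_one]
      rw [h3]

-- flatten of A's triple chunks
lemma flatten_triples (m : Nat) (f g : Nat → Char) (h : Nat → List Char) :
    ((List.range m).flatMap (fun t => [[f t], [g t], h t])).flatten
    = (List.range m).flatMap (fun t => f t :: g t :: h t) := by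
  induction m with
  | zero => simp
  | succ m ih => simp [List.range_succ, ih]

-- the two joined char lists agree, for any source list
lemma pvCore (l : List Char) :
    PySem.Chars.join [] (pvLoopA l 0 ((l.length : Int) - 1) 1 [])
    = PySem.Chars.join []
        ((PySem.List.enumerate
            ((PySem.List.slice l none (some (PySem.Int.floordiv (l.length : Int) 2))).zip
             ((PySem.List.slice? (PySem.List.slice l
                 (some ((l.length : Int) - PySem.Int.floordiv (l.length : Int) 2)) none)
               none none (-1)).getD [])) 1).map
          (fun p => [p.2.1, p.2.2] ++ PySem.Int.toChars p.1)) := by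
  set n := l.length with hn
  set half := n / 2 with hhalf
  have hhn : half ≤ n := Nat.div_le_self _ _
  rw [pvLoopA_eq l half 0 ((n : Int) - 1) 1 [] (by rw [hhalf]; omega)]
  rw [List.nil_append, join_nil_flatten, flatten_triples]
  have hfd : PySem.Int.floordiv (n : Int) 2 = ((half : Nat) : Int) := by
    exact_mod_cast PySem.Int.floordiv_natCast n 2
  rw [hfd]
  have hsub : (n : Int) - ((half : Nat) : Int) = ((n - half : Nat) : Int) := by omega
  rw [hsub, PySem.List.slice_to_natCast, PySem.List.slice_from_natCast,
    PySem.List.slice?_none_none_neg_one]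
  simp only [Option.getD_some]
  rw [join_nil_flatten, pvZipEnum_eq]
  have hu : (l.take half).length = half := by simp [List.length_take]; omega
  have hv : ((l.drop (n - half)).reverse).length = half := by
    simp [List.length_drop]; omega
  rw [hu, hv, min_self]
  apply List.flatMap_congr
  intro t ht
  rw [List.mem_range] at ht
  have htn : t < n := lt_of_lt_of_le ht hhn
  have e1 : PySem.List.pyGetD l (0 + (t : Int)) ' ' = (l.take half).getD t ' ' := by
    rw [zero_add, PySem.List.pyGetD_natCast]
    simp only [List.getD_eq_getElem?_getD]
    rw [List.getElem?_take_of_lt ht]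
  have e2 : PySem.List.pyGetD l ((n : Int) - 1 - (t : Int)) ' '
      = ((l.drop (n - half)).reverse).getD t ' ' := by
    have h1 : (n : Int) - 1 - (t : Int) = ((n - 1 - t : Nat) : Int) := by omega
    rw [h1, PySem.List.pyGetD_natCast]
    simp only [List.getD_eq_getElem?_getD]
    have ht' : t < ((l.drop (n - half))).length := by rw [List.length_drop]; omega
    rw [List.getElem?_reverse ht', List.getElem?_drop, List.length_drop]
    congr 2
    omega
  rw [e1, e2]

-- ===== VERDICT (by name: the statement is the Claim_ definition above) =====
theorem char_concat_spec : Claim_equal_char_concat := by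
  intro word _
  unfold Spec_char_concat char_concat char_concat_alt
  exact congrArg String.ofList (pvCore word.toList)
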